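-- pv_equiv track=rewrite | github.com/caizizhen/Cai_Agent | scripts/finalize_task.py | _remove_task_rows_from_section
-- ===== SOURCE A (Python) =====
-- def _section_bounds(lines: list[str], title: str) -> tuple[int, int] | None:
--     starts: list[tuple[str, int]] = []
--     for idx, line in enumerate(lines):
--         if line.startswith("## "):
--             starts.append((line.strip(), idx))
--     for pos, (candidate, start) in enumerate(starts):
--         if candidate == title:
--             end = starts[pos + 1][1] if pos + 1 < len(starts) else len(lines)
--             return start, end
--     return None
--
-- def _remove_task_rows_from_section(lines: list[str], title: str, task_ids: list[str]) -> list[str]: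
--     bounds = _section_bounds(lines, title)
--     if bounds is None:
--         return lines
--     start, end = bounds
--     before = lines[:start]
--     section = lines[start:end]
--     after = lines[end:]
--     filtered: list[str] = []
--     for line in section:
--         is_table_row = line.startswith("|")
--         has_task = any(f"`{tid}`" in line or tid in line for tid in task_ids)
--         if is_table_row and has_task:
--             continue
--         filtered.append(line)
--     return before + filtered + after
-- ===== SOURCE B (Python) =====
-- def _remove_task_rows_from_section(lines: list[str], title: str, task_ids: list[str]) -> list[str]:
--     out: list[str] = []
--     state = 0  # 0 = before the section, 1 = inside it, 2 = past it
--     for line in lines: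
--         if state == 0:
--             if line.startswith("## ") and line.strip() == title:
--                 state = 1
--             out.append(line)
--         elif state == 1:
--             if line.startswith("## "):
--                 state = 2
--                 out.append(line)
--             elif line.startswith("|") and any(tid in line for tid in task_ids):
--                 pass  # drop this table row
--             else:
--                 out.append(line)
--         else:
--             out.append(line)
--     return out
-- ===== Notes on version B (the rewrite author's own statement) =====
-- stated objective: simpler
-- what changed: Replaces the find-section-bounds (enumerate headers, locate title, compute end index), slice-into-three-parts, filter, and re-concatenate pipeline with a single pass over the lines driven by a 3-valued state (before / inside / past the section), dropping matching table rows only while inside; the redundant backtick-wrapped membership test is also dropped since `tid` in line implies tid in line.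
import Mathlib
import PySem

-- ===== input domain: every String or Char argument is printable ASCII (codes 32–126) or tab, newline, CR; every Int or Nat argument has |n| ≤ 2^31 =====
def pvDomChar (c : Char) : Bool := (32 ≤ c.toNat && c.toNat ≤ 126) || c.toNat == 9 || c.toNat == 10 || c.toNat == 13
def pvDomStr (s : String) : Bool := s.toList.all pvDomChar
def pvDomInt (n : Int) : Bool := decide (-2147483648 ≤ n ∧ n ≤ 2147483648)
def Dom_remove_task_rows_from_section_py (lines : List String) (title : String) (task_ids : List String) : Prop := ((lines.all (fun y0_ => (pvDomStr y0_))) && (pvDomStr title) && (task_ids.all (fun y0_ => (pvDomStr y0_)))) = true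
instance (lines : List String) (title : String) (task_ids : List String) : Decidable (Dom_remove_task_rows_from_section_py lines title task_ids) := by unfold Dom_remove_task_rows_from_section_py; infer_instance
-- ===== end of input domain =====

-- B replaces the find-bounds/slice/filter/concatenate pipeline by one pass over the
-- lines with a 3-valued state (before / inside / past the section); same return value.


-- ===== PORT A =====
-- starts = [(line.strip(), idx) for idx, line in enumerate(lines) if line.startswith("## ")]
def pvStartsA (lines : List String) : List (String × Int) :=
  (PySem.List.enumerate lines 0).foldl
    (fun starts p =>
      if PySem.Str.startswith p.2 "## " then starts ++ [(PySem.Str.strip p.2, p.1)] else starts) []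

-- the second loop of _section_bounds: for pos, (candidate, start) in enumerate(starts): …
def pvBoundsLoopA (title : String) (full : List (String × Int)) (n : Int) :
    List (String × Int) → Int → Option (Int × Int)
  | [], _ => none
  | (candidate, start) :: rest, pos =>
      if candidate = title then
        some (start,
          if pos + 1 < (full.length : Int) then (PySem.List.pyGetD full (pos + 1) ("", 0)).2 else n)
      else pvBoundsLoopA title full n rest (pos + 1)

def pvSectionBoundsA (lines : List String) (title : String) : Option (Int × Int) :=
  pvBoundsLoopA title (pvStartsA lines) (lines.length : Int) (pvStartsA lines) 0

-- has_task = any(f"`{tid}`" in line or tid in line for tid in task_ids)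
-- (the f-string "`{tid}`" is built on the character level; exact for every string)
def pvHasTaskA (task_ids : List String) (line : String) : Bool :=
  task_ids.any (fun tid =>
    PySem.Str.isIn (String.ofList ('`' :: (tid.toList ++ ['`']))) line || PySem.Str.isIn tid line)

def remove_task_rows_from_section_py (lines : List String) (title : String) (task_ids : List String) : List String :=
  match pvSectionBoundsA lines title with
  | none => lines
  | some (s, e) =>
      let before := PySem.List.slice lines none (some s)
      let sect := PySem.List.slice lines (some s) (some e)
      let after := PySem.List.slice lines (some e) none
      let filtered := sect.foldl (fun acc line =>
        if PySem.Str.startswith line "|" && pvHasTaskA task_ids line then acc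
        else acc ++ [line]) []
      before ++ filtered ++ after

-- ===== PORT B =====
-- one transition of Source B's state machine: state 0 = before the section, 1 = inside, 2 = past it
def pvStepB (title : String) (task_ids : List String) (st : Int × List String) (line : String) :
    Int × List String :=
  if st.1 = 0 then
    if PySem.Str.startswith line "## " && PySem.Str.strip line == title then (1, st.2 ++ [line])
    else (0, st.2 ++ [line])
  else if st.1 = 1 then
    if PySem.Str.startswith line "## " then (2, st.2 ++ [line])
    else if PySem.Str.startswith line "|" && task_ids.any (fun tid => PySem.Str.isIn tid line) then
      (1, st.2)
    else (1, st.2 ++ [line])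
  else (2, st.2 ++ [line])

def remove_task_rows_from_section_py_alt (lines : List String) (title : String) (task_ids : List String) : List String :=
  (lines.foldl (pvStepB title task_ids) (0, [])).2

-- ===== PRECONDITION & SPEC =====
def Spec_remove_task_rows_from_section_py (lines : List String) (title : String) (task_ids : List String) (out : List String) : Prop := out = remove_task_rows_from_section_py_alt lines title task_ids
instance (lines : List String) (title : String) (task_ids : List String) (out : List String) : Decidable (Spec_remove_task_rows_from_section_py lines title task_ids out) := by unfold Spec_remove_task_rows_from_section_py; infer_instance

-- ===== CLAIM (what is proved, stated in full; the proofs are below) =====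
def Claim_equal_remove_task_rows_from_section_py : Prop := ∀ (lines : List String) (title : String) (task_ids : List String), Dom_remove_task_rows_from_section_py lines title task_ids → Spec_remove_task_rows_from_section_py lines title task_ids (remove_task_rows_from_section_py lines title task_ids)

-- ===== LEMMAS AND PROOFS =====

-- abbreviations used only by the proofs
def pvHdr (l : String) : Bool := PySem.Str.startswith l "## "
def pvMatch (title l : String) : Bool := pvHdr l && (PySem.Str.strip l == title)
def pvRowB (task_ids : List String) (l : String) : Bool :=
  PySem.Str.startswith l "|" && task_ids.any (fun tid => PySem.Str.isIn tid l)
def pvRowA (task_ids : List String) (l : String) : Bool :=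
  PySem.Str.startswith l "|" && pvHasTaskA task_ids l

-- the closed form of A's inner find loop (proof-side only)
def pvFind (title : String) (n : Int) : List (String × Int) → Option (Int × Int)
  | [] => none
  | (c, s) :: rest =>
      if c = title then
        some (s, match rest with | [] => n | (_, s') :: _ => s')
      else pvFind title n rest

lemma ite_true_of_eq {α : Type} {b : Bool} (h : b = true) (x y : α) :
    (if b = true then x else y) = x := by simp [h]
lemma ite_false_of_eq {α : Type} {b : Bool} (h : b = false) (x y : α) :
    (if b = true then x else y) = y := by simp [h]

-- "`tid`" in line implies tid in line, so A's has_task test equals B's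
lemma hasTaskA_eq (task_ids : List String) (l : String) :
    pvHasTaskA task_ids l = task_ids.any (fun tid => PySem.Str.isIn tid l) := by
  unfold pvHasTaskA
  induction task_ids with
  | nil => rfl
  | cons tid rest ih =>
    simp only [List.any_cons, ih]
    congr 1
    cases hb : PySem.Str.isIn tid l
    · cases ha : PySem.Str.isIn (String.ofList ('`' :: (tid.toList ++ ['`']))) l
      · simp
      · exfalso
        rw [PySem.Str.isIn_iff_infix, String.toList_ofList] at ha
        have : tid.toList <:+: l.toList := by
          refine List.IsInfix.trans ?_ ha
          exact ⟨['`'], ['`'], by simp⟩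
        rw [← PySem.Str.isIn_iff_infix, hb] at this
        exact Bool.false_ne_true this
    · simp

-- a "## " header never starts with "|"
lemma hdr_not_row (l : String) (h : pvHdr l = true) : PySem.Str.startswith l "|" = false := by
  unfold pvHdr at h
  rw [PySem.Str.startswith_eq] at *
  rw [PySem.Chars.startswith_iff] at h
  by_contra hc
  rw [Bool.not_eq_false, PySem.Chars.startswith_iff] at hc
  obtain ⟨t1, h1⟩ := h
  obtain ⟨t2, h2⟩ := hc
  have e1 : "## ".toList = ['#', '#', ' '] := rfl
  have e2 : "|".toList = ['|'] := rfl
  have h3 : "## ".toList ++ t1 = "|".toList ++ t2 := h1.trans h2.symm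
  rw [e1, e2] at h3
  simp at h3

lemma startsA_eq (lines : List String) :
    pvStartsA lines =
      ((PySem.List.enumerate lines 0).filter (fun p => PySem.Str.startswith p.2 "## ")).map
        (fun p => (PySem.Str.strip p.2, p.1)) := by
  unfold pvStartsA
  exact PySem.List.foldl_append_if _ _ _ []

lemma enumerate_shift {α : Type} (xs : List α) (s : Int) :
    PySem.List.enumerate xs (s + 1) =
      (PySem.List.enumerate xs s).map (fun p => (p.1 + 1, p.2)) := by
  induction xs generalizing s with
  | nil => rfl
  | cons x xs ih =>
    rw [PySem.List.enumerate_cons, PySem.List.enumerate_cons, List.map_cons, ih]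

lemma startsA_cons (l : String) (ls : List String) :
    pvStartsA (l :: ls) =
      (if pvHdr l then [(PySem.Str.strip l, (0 : Int))] else []) ++
        (pvStartsA ls).map (fun p => (p.1, p.2 + 1)) := by
  have e := enumerate_shift ls 0
  rw [zero_add] at e
  rw [startsA_eq, startsA_eq, PySem.List.enumerate_cons, zero_add, e]
  unfold pvHdr
  split_ifs with h
  · have h' : PySem.Chars.startswith l.toList ['#', '#', ' '] = true := by simpa using h
    simp [h', List.filter_map, List.map_map]
    rfl
  · have h' : PySem.Chars.startswith l.toList ['#', '#', ' '] = false := by simpa using h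
    simp [h', List.filter_map, List.map_map]
    rfl

lemma boundsLoop_eq_find (title : String) (n : Int) (full : List (String × Int)) :
    ∀ (sts : List (String × Int)) (k : Nat), full.drop k = sts →
      pvBoundsLoopA title full n sts (k : Int) = pvFind title n sts := by
  intro sts
  induction sts with
  | nil => intro k _; rfl
  | cons p rest ih =>
    intro k hk
    obtain ⟨c, s⟩ := p
    rw [pvBoundsLoopA]
    simp only [pvFind]
    by_cases hc : c = title
    · rw [if_pos hc, if_pos hc]
      congr 1
      congr 1
      have hlen : full.length = k + 1 + rest.length := by
        have := congrArg List.length hk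
        simp at this
        omega
      cases rest with
      | nil =>
        rw [if_neg (by simp [hlen])]
      | cons q rest' =>
        rw [if_pos]
        · have hq : full[k+1]? = some q := by
            have h1 : (full.drop (k+1))[0]? = full[k+1]? := by
              rw [List.getElem?_drop]
            have h2 : full.drop (k + 1) = q :: rest' := by
              rw [← List.tail_drop, hk]
              rfl
            rw [h2] at h1
            simpa using h1.symm
          have hcast : ((k : Int) + 1) = ((k + 1 : Nat) : Int) := by push_cast; ring
          rw [hcast, PySem.List.pyGetD_natCast]
          rw [List.getD_eq_getElem?_getD, hq]
          rfl
        · simp [hlen]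
    · rw [if_neg hc, if_neg hc]
      have h2 : full.drop (k + 1) = rest := by
        rw [← List.tail_drop, hk]
        rfl
      have hcast : ((k : Int) + 1) = ((k + 1 : Nat) : Int) := by push_cast; ring
      rw [hcast]
      exact ih (k + 1) h2

lemma sectionBoundsA_eq_find (lines : List String) (title : String) :
    pvSectionBoundsA lines title =
      pvFind title (lines.length : Int) (pvStartsA lines) := by
  have h := boundsLoop_eq_find title (lines.length : Int) (pvStartsA lines) (pvStartsA lines) 0 rfl
  simpa using h

lemma find_shift (title : String) (n : Int) (sts : List (String × Int)) :
    pvFind title (n + 1) (sts.map (fun p => (p.1, p.2 + 1))) =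
      (pvFind title n sts).map (fun q => (q.1 + 1, q.2 + 1)) := by
  induction sts with
  | nil => rfl
  | cons p rest ih =>
    obtain ⟨c, s⟩ := p
    simp only [List.map_cons, pvFind]
    by_cases hc : c = title
    · rw [if_pos hc, if_pos hc]
      cases rest with
      | nil => rfl
      | cons q r => rfl
    · rw [if_neg hc, if_neg hc]
      exact ih

lemma startsA_snd_nonneg (ls : List String) :
    ∀ p ∈ pvStartsA ls, 0 ≤ p.2 := by
  intro p hp
  rw [startsA_eq] at hp
  simp only [List.mem_map, List.mem_filter] at hp
  obtain ⟨q, ⟨hq, _⟩, rfl⟩ := hp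
  rw [PySem.List.mem_enumerate_iff] at hq
  obtain ⟨k, hk, rfl⟩ := hq
  simp

lemma find_nonneg (title : String) (ls : List String) {s e : Int}
    (h : pvFind title (ls.length : Int) (pvStartsA ls) = some (s, e)) : 0 ≤ s ∧ 0 ≤ e := by
  have key : ∀ sts : List (String × Int), (∀ p ∈ sts, 0 ≤ p.2) →
      ∀ s' e', pvFind title (ls.length : Int) sts = some (s', e') → 0 ≤ s' ∧ 0 ≤ e' := by
    intro sts
    induction sts with
    | nil => intro _ s' e' h'; exact absurd h' (by simp [pvFind])
    | cons p rest ih =>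
      intro hnn s' e' h'
      obtain ⟨c, v⟩ := p
      simp only [pvFind] at h'
      split_ifs at h' with hc
      · cases rest with
        | nil =>
          simp at h'
          have h1 := hnn (c, v) (by simp)
          simp at h1
          omega
        | cons q r =>
          simp at h'
          have h1 := hnn (c, v) (by simp)
          have h2 := hnn q (by simp)
          simp at h1
          omega
      · exact ih (fun p hp => hnn p (List.mem_cons_of_mem _ hp)) s' e' h'
  exact key _ (startsA_snd_nonneg ls) s e h

-- head index of pvStartsA marks the first header: take/drop there = takeWhile/dropWhile
lemma startsA_head_split (ls : List String) :
    (pvStartsA ls = [] →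
      ls.takeWhile (fun l => !pvHdr l) = ls ∧ ls.dropWhile (fun l => !pvHdr l) = []) ∧
    (∀ c s rest, pvStartsA ls = (c, s) :: rest →
      0 ≤ s ∧ ls.take s.toNat = ls.takeWhile (fun l => !pvHdr l) ∧
        ls.drop s.toNat = ls.dropWhile (fun l => !pvHdr l)) := by
  induction ls with
  | nil => exact ⟨fun _ => ⟨rfl, rfl⟩, fun c s rest h => absurd h (by simp [pvStartsA])⟩
  | cons x xs ih =>
    rw [startsA_cons]
    by_cases hx : pvHdr x
    · rw [if_pos hx]
      refine ⟨fun h => absurd h (by simp), ?_⟩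
      intro c s rest h
      simp only [List.singleton_append, List.cons.injEq] at h
      obtain ⟨⟨rfl, rfl⟩, _⟩ := h
      refine ⟨le_refl 0, ?_, ?_⟩
      · simp [hx]
      · simp [hx]
    · rw [if_neg hx]
      simp only [List.nil_append]
      constructor
      · intro h
        rw [List.map_eq_nil_iff] at h
        obtain ⟨h1, h2⟩ := ih.1 h
        constructor
        · rw [List.takeWhile_cons, if_pos (by simp [hx]), h1]
        · rw [List.dropWhile_cons, if_pos (by simp [hx]), h2]
      · intro c s rest h
        cases hs : pvStartsA xs with
        | nil => rw [hs] at h; simp at h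
        | cons p rest' =>
          rw [hs] at h
          obtain ⟨c0, s0⟩ := p
          simp only [List.map_cons, List.cons.injEq, Prod.mk.injEq] at h
          obtain ⟨⟨hcc, hss⟩, _⟩ := h
          obtain ⟨hnn, ht, hd⟩ := ih.2 c0 s0 rest' hs
          have hs2 : s = s0 + 1 := by omega
          subst hs2
          have hts : (s0 + 1).toNat = s0.toNat + 1 := by omega
          refine ⟨by omega, ?_, ?_⟩
          · rw [hts, List.take_succ_cons, List.takeWhile_cons, if_pos (by simp [hx]), ht]
          · rw [hts, List.drop_succ_cons, List.dropWhile_cons, if_pos (by simp [hx]), hd]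

-- A's filter loop is List.filter
lemma foldl_filterA (p : String → Bool) :
    ∀ (xs acc : List String),
      xs.foldl (fun acc l => if p l then acc else acc ++ [l]) acc =
        acc ++ xs.filter (fun l => !p l) := by
  intro xs
  induction xs with
  | nil => simp
  | cons x xs ih =>
    intro acc
    rw [List.foldl_cons, List.filter_cons]
    cases hp : p x
    · simp only [Bool.not_false, if_true, ih]
      simp
    · simp only [Bool.not_true, if_true, ih]
      simp

lemma A_cons_notmatch (title : String) (task_ids : List String) (l : String) (ls : List String)
    (hm : pvMatch title l = false) :
    remove_task_rows_from_section_py (l :: ls) title task_ids =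
      l :: remove_task_rows_from_section_py ls title task_ids := by
  have hshift : pvSectionBoundsA (l :: ls) title =
      (pvFind title (ls.length : Int) (pvStartsA ls)).map (fun q => (q.1 + 1, q.2 + 1)) := by
    rw [sectionBoundsA_eq_find, startsA_cons]
    have hlen : (((l :: ls).length : Nat) : Int) = (ls.length : Int) + 1 := by simp
    rw [hlen]
    unfold pvMatch at hm
    by_cases hx : pvHdr l
    · rw [if_pos hx]
      have hne : PySem.Str.strip l ≠ title := by
        intro hc
        rw [hx, Bool.true_and, hc] at hm
        simp at hm
      rw [List.singleton_append]
      rw [show pvFind title ((ls.length : Int) + 1)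
            ((PySem.Str.strip l, (0:Int)) :: (pvStartsA ls).map (fun p => (p.1, p.2 + 1))) =
          pvFind title ((ls.length : Int) + 1) ((pvStartsA ls).map (fun p => (p.1, p.2 + 1)))
        from by simp only [pvFind]; rw [if_neg hne]]
      exact find_shift title _ _
    · rw [if_neg hx, List.nil_append]
      exact find_shift title _ _
  unfold remove_task_rows_from_section_py
  rw [hshift, sectionBoundsA_eq_find]
  cases hf : pvFind title (ls.length : Int) (pvStartsA ls) with
  | none => rfl
  | some q =>
    obtain ⟨s, e⟩ := q
    obtain ⟨hs, he⟩ := find_nonneg title ls hf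
    simp only [Option.map_some]
    have h1 : PySem.List.slice (l :: ls) none (some (s + 1)) =
        l :: PySem.List.slice ls none (some s) := by
      rw [PySem.List.slice_to _ (by omega), PySem.List.slice_to _ hs]
      rw [show (s + 1).toNat = s.toNat + 1 from by omega, List.take_succ_cons]
    have h2 : PySem.List.slice (l :: ls) (some (s + 1)) (some (e + 1)) =
        PySem.List.slice ls (some s) (some e) := by
      rw [PySem.List.slice_toNat _ (by omega) (by omega), PySem.List.slice_toNat _ hs he]
      rw [show (s + 1).toNat = s.toNat + 1 from by omega,
        show (e + 1).toNat = e.toNat + 1 from by omega, List.drop_succ_cons]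
      congr 1
      omega
    have h3 : PySem.List.slice (l :: ls) (some (e + 1)) none =
        PySem.List.slice ls (some e) none := by
      rw [PySem.List.slice_from _ (by omega), PySem.List.slice_from _ he]
      rw [show (e + 1).toNat = e.toNat + 1 from by omega, List.drop_succ_cons]
    rw [h1, h2, h3]
    simp

lemma A_cons_match (title : String) (task_ids : List String) (l : String) (ls : List String)
    (hm : pvMatch title l = true) :
    remove_task_rows_from_section_py (l :: ls) title task_ids =
      l :: ((ls.takeWhile (fun x => !pvHdr x)).filter (fun x => !pvRowA task_ids x) ++
            ls.dropWhile (fun x => !pvHdr x)) := by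
  unfold pvMatch at hm
  have hx : pvHdr l = true := by
    cases hh : pvHdr l
    · rw [hh] at hm; simp at hm
    · rfl
  have hst : PySem.Str.strip l = title := by
    rw [hx, Bool.true_and] at hm
    simpa using hm
  have hlrow : PySem.Str.startswith l "|" = false := hdr_not_row l hx
  have hlen : (((l :: ls).length : Nat) : Int) = (ls.length : Int) + 1 := by simp
  unfold remove_task_rows_from_section_py
  rw [sectionBoundsA_eq_find, startsA_cons, if_pos hx, hlen, List.singleton_append, hst]
  rw [show pvFind title ((ls.length : Int) + 1)
        ((title, (0:Int)) :: (pvStartsA ls).map (fun p => (p.1, p.2 + 1))) =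
      some ((0:Int), match (pvStartsA ls).map (fun p => (p.1, p.2 + 1)) with
        | [] => (ls.length : Int) + 1 | (_, s') :: _ => s')
    from by simp [pvFind]]
  cases hs : pvStartsA ls with
  | nil =>
    obtain ⟨ht, hd⟩ := (startsA_head_split ls).1 hs
    simp only [List.map_nil]
    have hE : ((ls.length : Int) + 1).toNat = ls.length + 1 := by omega
    have e1 : PySem.List.slice (l :: ls) none (some 0) = [] := by
      rw [PySem.List.slice_to _ le_rfl]
      simp
    have e2 : PySem.List.slice (l :: ls) (some 0) (some ((ls.length : Int) + 1)) = l :: ls := by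
      rw [PySem.List.slice_toNat _ le_rfl (by omega), hE]
      simp
    have e3 : PySem.List.slice (l :: ls) (some ((ls.length : Int) + 1)) none = [] := by
      rw [PySem.List.slice_from _ (by omega), hE]
      simp
    rw [e1, e2, e3, foldl_filterA, List.filter_cons, hlrow]
    simp only [Bool.false_and, Bool.not_false]
    rw [if_pos trivial, ht, hd]
    simp [pvRowA]
  | cons p rest' =>
    obtain ⟨c0, s0⟩ := p
    obtain ⟨hnn, ht, hd⟩ := (startsA_head_split ls).2 c0 s0 rest' hs
    simp only [List.map_cons]
    have hts : (s0 + 1).toNat = s0.toNat + 1 := by omega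
    have e1 : PySem.List.slice (l :: ls) none (some 0) = [] := by
      rw [PySem.List.slice_to _ le_rfl]
      simp
    have e2 : PySem.List.slice (l :: ls) (some 0) (some (s0 + 1)) = l :: ls.take s0.toNat := by
      rw [PySem.List.slice_toNat _ le_rfl (by omega), hts]
      simp
    have e3 : PySem.List.slice (l :: ls) (some (s0 + 1)) none = ls.drop s0.toNat := by
      rw [PySem.List.slice_from _ (by omega), hts, List.drop_succ_cons]
    rw [e1, e2, e3, foldl_filterA, List.filter_cons, hlrow]
    simp only [Bool.false_and, Bool.not_false]
    rw [if_pos trivial, ht, hd]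
    simp [pvRowA]

-- B-side loop lemmas
lemma stepB_split (title : String) (task_ids : List String) (st : Int) (out : List String) (l : String) :
    (pvStepB title task_ids (st, out) l).1 = (pvStepB title task_ids (st, []) l).1 ∧
    (pvStepB title task_ids (st, out) l).2 = out ++ (pvStepB title task_ids (st, []) l).2 := by
  unfold pvStepB
  dsimp only
  split_ifs <;> simp

lemma stepB_out (title : String) (task_ids : List String) :
    ∀ (ls : List String) (st : Int) (out : List String),
      (ls.foldl (pvStepB title task_ids) (st, out)).2 =
        out ++ (ls.foldl (pvStepB title task_ids) (st, [])).2 := by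
  intro ls
  induction ls with
  | nil => simp
  | cons l ls ih =>
    intro st out
    rw [List.foldl_cons, List.foldl_cons]
    obtain ⟨h1, h2⟩ := stepB_split title task_ids st out l
    have e1 : pvStepB title task_ids (st, out) l =
        ((pvStepB title task_ids (st, []) l).1, out ++ (pvStepB title task_ids (st, []) l).2) := by
      rw [Prod.ext_iff]; exact ⟨h1, h2⟩
    rw [e1, ih _ (out ++ _), ih _ ((pvStepB title task_ids (st, []) l).2)]
    cases h : pvStepB title task_ids (st, []) l with
    | mk a b => simp

lemma stepB_state2 (title : String) (task_ids : List String) :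
    ∀ (ls out : List String), ls.foldl (pvStepB title task_ids) (2, out) = (2, out ++ ls) := by
  intro ls
  induction ls with
  | nil => simp
  | cons l ls ih =>
    intro out
    rw [List.foldl_cons]
    have h : pvStepB title task_ids (2, out) l = (2, out ++ [l]) := by
      unfold pvStepB; norm_num
    rw [h, ih]
    simp

lemma stepB_state1 (title : String) (task_ids : List String) :
    ∀ (ls out : List String),
      (ls.foldl (pvStepB title task_ids) (1, out)).2 =
        out ++ ((ls.takeWhile (fun l => !pvHdr l)).filter (fun l => !pvRowB task_ids l) ++
          ls.dropWhile (fun l => !pvHdr l)) := by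
  intro ls
  induction ls with
  | nil => simp
  | cons l ls ih =>
    intro out
    rw [List.foldl_cons]
    by_cases hh : pvHdr l
    · unfold pvHdr at hh
      have h : pvStepB title task_ids (1, out) l = (2, out ++ [l]) := by
        unfold pvStepB
        dsimp only
        rw [if_neg (by omega : ¬((1:Int) = 0)), if_pos (rfl : (1:Int) = 1), ite_true_of_eq hh]
      rw [h, stepB_state2]
      rw [List.takeWhile_cons, List.dropWhile_cons]
      have hh2 : PySem.Chars.startswith l.toList ['#', '#', ' '] = true := by simpa using hh
      simp [pvHdr, hh2]
    · by_cases hr : pvRowB task_ids l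
      · unfold pvHdr at hh
        rw [Bool.not_eq_true] at hh
        unfold pvRowB at hr
        have h : pvStepB title task_ids (1, out) l = (1, out) := by
          unfold pvStepB
          dsimp only
          rw [if_neg (by omega : ¬((1:Int) = 0)), if_pos (rfl : (1:Int) = 1),
            ite_false_of_eq hh, ite_true_of_eq hr]
        rw [h, ih]
        rw [List.takeWhile_cons, List.dropWhile_cons]
        have hh2 : PySem.Chars.startswith l.toList ['#', '#', ' '] = false := by simpa using hh
        simp [pvHdr, hh2, List.filter_cons, pvRowB]
        simpa using hr
      · unfold pvHdr at hh
        rw [Bool.not_eq_true] at hh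
        unfold pvRowB at hr
        rw [Bool.not_eq_true] at hr
        have h : pvStepB title task_ids (1, out) l = (1, out ++ [l]) := by
          unfold pvStepB
          dsimp only
          rw [if_neg (by omega : ¬((1:Int) = 0)), if_pos (rfl : (1:Int) = 1),
            ite_false_of_eq hh, ite_false_of_eq hr]
        rw [h, ih]
        rw [List.takeWhile_cons, List.dropWhile_cons]
        have hh2 : PySem.Chars.startswith l.toList ['#', '#', ' '] = false := by simpa using hh
        simp [pvHdr, hh2, List.filter_cons, pvRowB]
        rw [if_pos (by
          have hr3 := (by simpa using hr :
            PySem.Chars.startswith l.toList ['|'] = true → ∀ x ∈ task_ids, PySem.Chars.isIn x.toList l.toList = false)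
          cases hsw : PySem.Chars.startswith l.toList ['|']
          · exact Or.inl rfl
          · exact Or.inr (hr3 hsw))]
        simp

lemma B_cons (title : String) (task_ids : List String) (l : String) (ls : List String) :
    remove_task_rows_from_section_py_alt (l :: ls) title task_ids =
      if pvMatch title l then
        l :: ((ls.takeWhile (fun x => !pvHdr x)).filter (fun x => !pvRowB task_ids x) ++
          ls.dropWhile (fun x => !pvHdr x))
      else l :: remove_task_rows_from_section_py_alt ls title task_ids := by
  unfold remove_task_rows_from_section_py_alt
  rw [List.foldl_cons]
  by_cases hm : pvMatch title l
  · rw [if_pos hm]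
    unfold pvMatch pvHdr at hm
    have h : pvStepB title task_ids (0, []) l = (1, [l]) := by
      unfold pvStepB
      dsimp only
      rw [if_pos (rfl : (0:Int) = 0), ite_true_of_eq hm]
      rfl
    rw [h, stepB_state1]
    rfl
  · rw [if_neg hm]
    unfold pvMatch pvHdr at hm
    rw [Bool.not_eq_true] at hm
    have h : pvStepB title task_ids (0, []) l = (0, [l]) := by
      unfold pvStepB
      dsimp only
      rw [if_pos (rfl : (0:Int) = 0), ite_false_of_eq hm]
      rfl
    rw [h, stepB_out]
    rfl

lemma main_eq (title : String) (task_ids : List String) :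
    ∀ lines : List String,
      remove_task_rows_from_section_py lines title task_ids =
        remove_task_rows_from_section_py_alt lines title task_ids := by
  intro lines
  induction lines with
  | nil => rfl
  | cons l ls ih =>
    rw [B_cons]
    by_cases hm : pvMatch title l
    · rw [if_pos hm, A_cons_match title task_ids l ls hm]
      congr 2
      apply List.filter_congr
      intro x _
      unfold pvRowA pvRowB
      rw [hasTaskA_eq]
    · rw [if_neg hm, A_cons_notmatch title task_ids l ls (by simpa using hm), ih]

-- ===== VERDICT (by name: the statement is the Claim_ definition above) =====
theorem remove_task_rows_from_section_py_spec : Claim_equal_remove_task_rows_from_section_py := by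
  intro lines title task_ids _
  unfold Spec_remove_task_rows_from_section_py
  exact main_eq title task_ids lines
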